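-- pv_equiv track=rewrite | github.com/icl-utk-edu/slate | tools/fortran/generate_fortran_module.py | preprocess_list
-- ===== SOURCE A (Python) =====
-- def preprocess_list(initial_list):
--     """Preprocessing and cleaning of the header file.
--        Works with a list of strings.
--        Produces a new list in which each function, enum or struct
--        corresponds to a single item."""
--
--     # merge braces
--     list1 = []
--     merged_line = ""
--     nopen = 0
--     inStruct = False
--     for line in initial_list:
--         if (line.find("struct") > -1):
--             inStruct = True
--
--         if (inStruct):
--             split_character = ","
--         else:
--             split_character = ""
--
--         nopen += line.count("{") - line.count("}")
--         merged_line += line + split_character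
--
--         if (nopen <= 0):
--             list1.append(merged_line)
--             merged_line = ""
--             isOpen   = False
--             inStruct = False
--             nopen = 0
--
--     # merge structs
--     list2 = []
--     merged_line = ""
--     for line in list1:
--         merged_line += line
--
--         if (line.find("struct") == -1):
--             list2.append(merged_line)
--             merged_line = ""
--
--     # clean orphan braces
--     list3 = []
--     for line in list2:
--         if (line.strip() != "}"):
--             list3.append(line)
--
--     return list3
-- ===== SOURCE B (Python) =====
-- def preprocess_list(initial_list):
--     """Single streaming pass: maintain brace depth, the current brace group,
--     and a struct-merge buffer; emit one item per finished declaration."""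
--     out = []
--     acc = ""          # struct-merge buffer (pass-2 state fused in)
--     buf = ""          # current brace-group buffer
--     nopen = 0
--     in_struct = False
--     for line in initial_list:
--         if "struct" in line:
--             in_struct = True
--         nopen += line.count("{") - line.count("}")
--         buf += line + ("," if in_struct else "")
--         if nopen <= 0:
--             acc += buf
--             if "struct" not in buf:
--                 if acc.strip() != "}":
--                     out.append(acc)
--                 acc = ""
--             buf = ""
--             nopen = 0
--             in_struct = False
--     # any unbalanced trailing buf, or a trailing struct-merge buffer, is discarded
--     return out
-- ===== Notes on version B (the rewrite author's own statement) =====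
-- stated objective: simpler
-- what changed: Replaces A's three sequential passes (brace merging, struct merging, orphan-brace filtering) with one streaming loop that fuses all three into a single traversal with a group buffer and a struct-merge buffer.
import Mathlib
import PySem

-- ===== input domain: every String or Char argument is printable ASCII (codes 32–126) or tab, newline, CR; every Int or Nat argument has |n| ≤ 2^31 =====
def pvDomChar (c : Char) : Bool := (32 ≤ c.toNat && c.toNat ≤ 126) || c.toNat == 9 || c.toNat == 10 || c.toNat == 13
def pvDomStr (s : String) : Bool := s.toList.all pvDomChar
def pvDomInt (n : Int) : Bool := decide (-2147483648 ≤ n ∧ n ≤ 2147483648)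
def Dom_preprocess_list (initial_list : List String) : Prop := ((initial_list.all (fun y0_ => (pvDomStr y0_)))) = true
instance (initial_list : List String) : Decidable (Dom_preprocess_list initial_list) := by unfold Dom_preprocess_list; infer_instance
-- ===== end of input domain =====

-- B fuses A's three passes (brace merging, struct merging, orphan-brace filter)
-- into one streaming loop; same O(n) cost, a single traversal without intermediate lists.

-- ===== PORT A =====
-- pass 1 ("merge braces") loop body
def pvStepA1 (st : List String × String × Int × Bool) (line : String) : List String × String × Int × Bool :=
  let inStruct := if PySem.Str.find line "struct" > -1 then true else st.2.2.2
  let split_character := if inStruct then "," else ""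
  let nopen := st.2.2.1 + ((PySem.Str.count line "{" : Int) - (PySem.Str.count line "}" : Int))
  let merged := st.2.1 ++ line ++ split_character
  if nopen ≤ 0 then (st.1 ++ [merged], "", 0, false) else (st.1, merged, nopen, inStruct)

-- pass 2 ("merge structs") loop body
def pvStepA2 (st : List String × String) (line : String) : List String × String :=
  let merged := st.2 ++ line
  if PySem.Str.find line "struct" = -1 then (st.1 ++ [merged], "") else (st.1, merged)

-- pass 3 ("clean orphan braces") loop body
def pvStepA3 (list3 : List String) (line : String) : List String :=
  if PySem.Str.strip line ≠ "}" then list3 ++ [line] else list3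

def preprocess_list (initial_list : List String) : List String :=
  ((((initial_list.foldl pvStepA1 ([], "", 0, false)).1).foldl pvStepA2 ([], "")).1).foldl pvStepA3 []

-- ===== PORT B =====
-- single streaming loop: state = (out, acc: struct-merge buffer, buf: group buffer, nopen, inStruct)
def pvBgo : List String → List String → String → String → Int → Bool → List String
  | [], out, _, _, _, _ => out
  | line :: rest, out, acc, buf, nopen, inStruct =>
    let inStruct := PySem.Str.isIn "struct" line || inStruct
    let nopen := nopen + ((PySem.Str.count line "{" : Int) - (PySem.Str.count line "}" : Int))
    let buf := buf ++ line ++ (if inStruct then "," else "")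
    if nopen ≤ 0 then
      if PySem.Str.isIn "struct" buf then
        -- the group mentions struct: keep accumulating into acc
        pvBgo rest out (acc ++ buf) "" 0 false
      else
        -- flush acc ++ buf as one item unless it strips to "}"
        pvBgo rest (if PySem.Str.strip (acc ++ buf) ≠ "}" then out ++ [acc ++ buf] else out) "" "" 0 false
    else
      pvBgo rest out acc buf nopen inStruct

def preprocess_list_alt (initial_list : List String) : List String :=
  pvBgo initial_list [] "" "" 0 false

-- ===== PRECONDITION & SPEC =====
def Spec_preprocess_list (initial_list : List String) (out : List String) : Prop := out = preprocess_list_alt initial_list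
instance (initial_list : List String) (out : List String) : Decidable (Spec_preprocess_list initial_list out) := by unfold Spec_preprocess_list; infer_instance

-- ===== CLAIM (what is proved, stated in full; the proofs are below) =====
def Claim_equal_preprocess_list : Prop := ∀ (initial_list : List String), Dom_preprocess_list initial_list → Spec_preprocess_list initial_list (preprocess_list initial_list)

-- ===== LEMMAS AND PROOFS =====

-- `s.find(sub) > -1` is `sub in s`
lemma pvIsIn_eq (s : String) :
    PySem.Str.isIn "struct" s = decide (PySem.Str.find s "struct" > -1) := by
  by_cases h : ("struct" : String).toList <:+: s.toList
  · have h1 : PySem.Str.isIn "struct" s = true := (PySem.Str.isIn_iff_infix _ _).mpr h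
    have h2 : (0 : Int) ≤ PySem.Str.find s "struct" := (PySem.Str.find_nonneg_iff _ _).mpr h
    rw [h1, eq_comm, decide_eq_true_iff]
    omega
  · have h1 : PySem.Str.isIn "struct" s = false := by
      rw [← Bool.not_eq_true, PySem.Str.isIn_iff_infix]; exact h
    have h2 : PySem.Str.find s "struct" = -1 := (PySem.Str.find_eq_neg_one_iff _ _).mpr h
    rw [h1, eq_comm, decide_eq_false_iff_not]
    omega

-- structural (accumulator-free) versions of A's passes, used only in the proofs
def pvP1 : List String → String → Int → Bool → List String
  | [], _, _, _ => []
  | line :: rest, m, n, s =>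
    let s := PySem.Str.isIn "struct" line || s
    let n := n + ((PySem.Str.count line "{" : Int) - (PySem.Str.count line "}" : Int))
    let m := m ++ line ++ (if s then "," else "")
    if n ≤ 0 then m :: pvP1 rest "" 0 false else pvP1 rest m n s

def pvP2 : List String → String → List String
  | [], _ => []
  | x :: xs, m =>
    if PySem.Str.isIn "struct" x then pvP2 xs (m ++ x) else (m ++ x) :: pvP2 xs ""

lemma pvPass1_eq (L : List String) : ∀ (l1 : List String) (m : String) (n : Int) (s : Bool),
    (L.foldl pvStepA1 (l1, m, n, s)).1 = l1 ++ pvP1 L m n s := by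
  induction L with
  | nil => intro l1 m n s; simp [pvP1]
  | cons line rest ih =>
    intro l1 m n s
    rw [List.foldl_cons]
    have hc : (if PySem.Str.find line "struct" > -1 then true else s)
        = (PySem.Str.isIn "struct" line || s) := by
      rw [pvIsIn_eq]
      by_cases hf : PySem.Str.find line "struct" > -1 <;> simp [hf]
    simp only [pvStepA1, pvP1, hc]
    split
    · rw [ih]; simp
    · rw [ih]

lemma pvPass2_eq (L : List String) : ∀ (l2 : List String) (m : String),
    (L.foldl pvStepA2 (l2, m)).1 = l2 ++ pvP2 L m := by
  induction L with
  | nil => intro l2 m; simp [pvP2]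
  | cons x xs ih =>
    intro l2 m
    rw [List.foldl_cons]
    have h2 : (-1 : Int) ≤ PySem.Str.find x "struct" := by
      simp only [PySem.Str.find_eq]
      exact PySem.Chars.neg_one_le_find _ _
    have hc : (PySem.Str.find x "struct" = -1) ↔ (PySem.Str.isIn "struct" x = false) := by
      rw [pvIsIn_eq]
      constructor
      · intro h; rw [decide_eq_false_iff_not]; omega
      · intro h; have := of_decide_eq_false h; omega
    simp only [pvStepA2, pvP2]
    by_cases hf : PySem.Str.find x "struct" = -1
    · have hb : PySem.Str.isIn "struct" x = false := hc.mp hf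
      simp only [hf, if_pos, hb, Bool.false_eq_true, ite_false]
      rw [ih]; simp
    · have hb : PySem.Str.isIn "struct" x = true := by
        cases hx : PySem.Str.isIn "struct" x
        · exact absurd (hc.mpr hx) hf
        · rfl
      simp only [hf, hb, ite_true, ite_false]
      rw [ih]

lemma pvPass3_eq (L : List String) : ∀ (l3 : List String),
    L.foldl pvStepA3 l3 = l3 ++ L.filter (fun line => PySem.Str.strip line != "}") := by
  induction L with
  | nil => intro l3; simp
  | cons x xs ih =>
    intro l3
    rw [List.foldl_cons, List.filter_cons]
    by_cases h : PySem.Str.strip x = "}"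
    · simp only [pvStepA3, h, ne_eq, not_true_eq_false, ite_false, bne_self_eq_false]
      rw [ih]; simp
    · have hb : (PySem.Str.strip x != "}") = true := by simp [bne_iff_ne, h]
      simp only [pvStepA3, h, ne_eq, not_false_eq_true, ite_true, hb]
      rw [ih]; simp

lemma pvA_eq (L : List String) :
    preprocess_list L = (pvP2 (pvP1 L "" 0 false) "").filter (fun line => PySem.Str.strip line != "}") := by
  unfold preprocess_list
  rw [pvPass1_eq, List.nil_append, pvPass2_eq, List.nil_append, pvPass3_eq, List.nil_append]

-- main fusion invariant: the single loop from any state equals the residual three-pass pipeline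
lemma pvBgo_eq (L : List String) : ∀ (out : List String) (acc buf : String) (n : Int) (s : Bool),
    pvBgo L out acc buf n s
      = out ++ (pvP2 (pvP1 L buf n s) acc).filter (fun line => PySem.Str.strip line != "}") := by
  induction L with
  | nil => intro out acc buf n s; simp [pvBgo, pvP1, pvP2]
  | cons line rest ih =>
    intro out acc buf n s
    simp only [pvBgo, pvP1]
    by_cases hn : n + ((PySem.Str.count line "{" : Int) - (PySem.Str.count line "}" : Int)) ≤ 0
    · -- group closed
      rw [if_pos hn, if_pos hn]
      simp only [pvP2]
      by_cases hb : PySem.Str.isIn "struct" (buf ++ line ++ (if (PySem.Str.isIn "struct" line || s) = true then "," else "")) = true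
      · -- group mentions struct: keep accumulating
        rw [if_pos hb, if_pos hb, ih]
      · -- flush
        rw [if_neg hb, if_neg hb, List.filter_cons]
        by_cases h : PySem.Str.strip (acc ++ (buf ++ line ++ (if (PySem.Str.isIn "struct" line || s) = true then "," else ""))) = "}"
        · have hb2 : (PySem.Str.strip (acc ++ (buf ++ line ++ (if (PySem.Str.isIn "struct" line || s) = true then "," else ""))) != "}") = false := by
            rw [h]; rfl
          rw [if_neg (not_not_intro h), ih]
          simp only [hb2]
          simp
        · have hb2 : (PySem.Str.strip (acc ++ (buf ++ line ++ (if (PySem.Str.isIn "struct" line || s) = true then "," else ""))) != "}") = true := by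
            exact bne_iff_ne.mpr h
          rw [if_pos h, ih]
          simp only [hb2]
          simp
    · -- group still open
      rw [if_neg hn, if_neg hn, ih]

-- ===== VERDICT (by name: the statement is the Claim_ definition above) =====
theorem preprocess_list_spec : Claim_equal_preprocess_list := by
  intro L _
  unfold Spec_preprocess_list preprocess_list_alt
  rw [pvA_eq, pvBgo_eq, List.nil_append]
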